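-- pv_equiv track=rewrite | github.com/ultralytics/ultralytics | docs/build_reference.py | _split_section_entries
-- ===== SOURCE A (Python) =====
-- def _split_section_entries(lines: list[str]) -> list[list[str]]:
--     """Split a docstring section into entries based on indentation."""
--     entries: list[list[str]] = []
--     current: list[str] = []
--     base_indent: int | None = None
--
--     for raw_line in lines:
--         if not raw_line.strip():
--             if current:
--                 current.append("")
--             continue
--         indent = len(raw_line) - len(raw_line.lstrip(" "))
--         if base_indent is None:
--             base_indent = indent
--         if indent <= base_indent and current:
--             entries.append(current)
--             current = [raw_line]
--         else:
--             current.append(raw_line)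
--     if current:
--         entries.append(current)
--     return entries
-- ===== SOURCE B (Python) =====
-- def _split_section_entries(lines: list[str]) -> list[list[str]]:
--     """Split a docstring section into entries based on indentation."""
--     def is_blank(l: str) -> bool:
--         return not l.strip()
--
--     i = 0
--     while i < len(lines) and is_blank(lines[i]):
--         i += 1
--     rest = lines[i:]
--     if not rest:
--         return []
--     base = len(rest[0]) - len(rest[0].lstrip(" "))
--
--     def is_start(l: str) -> bool:
--         return (not is_blank(l)) and len(l) - len(l.lstrip(" ")) <= base
--
--     entries: list[list[str]] = []
--     while rest:
--         head, tail = rest[0], rest[1:]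
--         j = 0
--         while j < len(tail) and not is_start(tail[j]):
--             j += 1
--         entries.append(["" if is_blank(l) else l for l in [head] + tail[:j]])
--         rest = tail[j:]
--     return entries
-- ===== Notes on version B (the rewrite author's own statement) =====
-- stated objective: alternative
-- what changed: Replaces A's single accumulate-and-flush pass (entries/current/base_indent state machine) by a span decomposition: skip leading blanks, fix the base indent, then repeatedly slice off one entry as its head line plus the following run of non-entry-start lines, blank-mapping each span.
import Mathlib
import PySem

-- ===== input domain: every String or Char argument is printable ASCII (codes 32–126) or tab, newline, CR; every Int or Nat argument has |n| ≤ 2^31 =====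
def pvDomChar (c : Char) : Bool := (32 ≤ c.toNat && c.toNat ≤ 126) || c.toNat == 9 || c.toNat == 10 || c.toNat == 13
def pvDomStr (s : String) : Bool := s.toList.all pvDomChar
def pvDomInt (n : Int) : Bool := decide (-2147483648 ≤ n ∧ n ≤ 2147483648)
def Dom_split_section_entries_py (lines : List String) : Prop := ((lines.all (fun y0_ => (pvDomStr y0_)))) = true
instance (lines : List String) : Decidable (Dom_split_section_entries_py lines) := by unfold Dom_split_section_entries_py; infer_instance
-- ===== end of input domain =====

-- B replaces A's accumulate-and-flush single pass by a span decomposition (skip leading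
-- blanks, then repeatedly take one entry as head + run of non-start lines); objective: alternative.

-- `not raw_line.strip()` — a line is blank iff stripping all whitespace leaves nothing
def pvIsBlank (s : String) : Bool := PySem.Str.strip s == ""
-- `len(l) - len(l.lstrip(" "))` counts exactly the leading spaces of l (exact hand port)
def pvIndent (s : String) : Nat := (s.toList.takeWhile (fun c => c == ' ')).length

-- ===== PORT A =====
def pvStepA (st : List (List String) × List String × Option Nat) (raw : String) :
    List (List String) × List String × Option Nat :=
  let entries := st.1
  let current := st.2.1
  let base? := st.2.2
  if pvIsBlank raw then
    if current.isEmpty then st else (entries, current ++ [""], base?)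
  else
    let ind := pvIndent raw
    let base := base?.getD ind          -- `if base_indent is None: base_indent = indent`
    if decide (ind ≤ base) && !current.isEmpty then
      (entries ++ [current], [raw], some base)
    else
      (entries, current ++ [raw], some base)

def split_section_entries_py (lines : List String) : List (List String) :=
  let st := lines.foldl pvStepA ([], [], none)
  if st.2.1.isEmpty then st.1 else st.1 ++ [st.2.1]

-- ===== PORT B =====
def pvIsStart (base : Nat) (l : String) : Bool := !pvIsBlank l && decide (pvIndent l ≤ base)

def pvBlankTo (l : String) : String := if pvIsBlank l then "" else l

def pvSplitGo (base : Nat) : List String → List (List String)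
  | [] => []
  | head :: tail =>
      ((head :: tail.takeWhile (fun l => !pvIsStart base l)).map pvBlankTo)
        :: pvSplitGo base (tail.dropWhile (fun l => !pvIsStart base l))
termination_by l => l.length
decreasing_by
  exact Nat.lt_succ_of_le (List.length_dropWhile_le _ _)

def split_section_entries_py_alt (lines : List String) : List (List String) :=
  match lines.dropWhile pvIsBlank with
  | [] => []
  | head :: tail => pvSplitGo (pvIndent head) (head :: tail)

-- ===== PRECONDITION & SPEC =====
def Spec_split_section_entries_py (lines : List String) (out : List (List String)) : Prop := out = split_section_entries_py_alt lines
instance (lines : List String) (out : List (List String)) : Decidable (Spec_split_section_entries_py lines out) := by unfold Spec_split_section_entries_py; infer_instance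

-- ===== CLAIM (what is proved, stated in full; the proofs are below) =====
def Claim_equal_split_section_entries_py : Prop := ∀ (lines : List String), Dom_split_section_entries_py lines → Spec_split_section_entries_py lines (split_section_entries_py lines)

-- ===== LEMMAS AND PROOFS =====

def pvFinalize (st : List (List String) × List String × Option Nat) : List (List String) :=
  if st.2.1.isEmpty then st.1 else st.1 ++ [st.2.1]

-- loop invariant: once the base indent is fixed and `current` is nonempty, the rest of A's
-- fold produces exactly `cur ++` the blank-mapped non-start run, then B's spans of the rest
theorem pvFoldA_eq (b : Nat) (ys : List String) :
    ∀ (entries : List (List String)) (cur : List String), cur ≠ [] →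
    pvFinalize (ys.foldl pvStepA (entries, cur, some b))
      = entries ++ (cur ++ (ys.takeWhile (fun l => !pvIsStart b l)).map pvBlankTo)
          :: pvSplitGo b (ys.dropWhile (fun l => !pvIsStart b l)) := by
  induction ys with
  | nil =>
      intro entries cur hcur
      simp [pvFinalize, pvSplitGo, hcur]
  | cons y ys ih =>
      intro entries cur hcur
      have hne := List.isEmpty_eq_false_iff.mpr hcur
      by_cases hbl : pvIsBlank y = true
      · have hstart : pvIsStart b y = false := by simp [pvIsStart, hbl]
        have hstep : pvStepA (entries, cur, some b) y = (entries, cur ++ [""], some b) := by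
          simp [pvStepA, hbl, hne]
        rw [List.foldl_cons, hstep, ih entries (cur ++ [""]) (by simp)]
        simp [hstart, pvBlankTo, hbl]
      · have hbl' : pvIsBlank y = false := by simpa using hbl
        by_cases hle : pvIndent y ≤ b
        · have hstart : pvIsStart b y = true := by simp [pvIsStart, hbl', hle]
          have hstep : pvStepA (entries, cur, some b) y
              = (entries ++ [cur], [y], some b) := by
            simp [pvStepA, hbl', hne, hle]
          rw [List.foldl_cons, hstep, ih (entries ++ [cur]) [y] (by simp)]
          simp [hstart, pvSplitGo, pvBlankTo, hbl']
        · have hstart : pvIsStart b y = false := by simp [pvIsStart, hle]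
          have hstep : pvStepA (entries, cur, some b) y
              = (entries, cur ++ [y], some b) := by
            simp [pvStepA, hbl', hle]
          rw [List.foldl_cons, hstep, ih entries (cur ++ [y]) (by simp)]
          simp [hstart, pvBlankTo, hbl']

theorem pvMain (lines : List String) :
    split_section_entries_py lines = split_section_entries_py_alt lines := by
  induction lines with
  | nil => rfl
  | cons l ls ih =>
      by_cases hbl : pvIsBlank l = true
      · have hA : split_section_entries_py (l :: ls) = split_section_entries_py ls := by
          simp [split_section_entries_py, pvStepA, hbl, List.isEmpty]
        have hB : split_section_entries_py_alt (l :: ls) = split_section_entries_py_alt ls := by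
          simp [split_section_entries_py_alt, hbl]
        rw [hA, hB, ih]
      · have hbl' : pvIsBlank l = false := by simpa using hbl
        have hA1 : (l :: ls).foldl pvStepA ([], [], none)
            = ls.foldl pvStepA ([], [l], some (pvIndent l)) := by
          simp [pvStepA, hbl', List.isEmpty]
        have := pvFoldA_eq (pvIndent l) ls [] [l] (by simp)
        rw [show split_section_entries_py (l :: ls)
              = pvFinalize ((l :: ls).foldl pvStepA ([], [], none)) from rfl, hA1, this]
        simp [split_section_entries_py_alt, hbl', pvSplitGo,
          pvBlankTo]

-- ===== VERDICT (by name: the statement is the Claim_ definition above) =====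
theorem split_section_entries_py_spec : Claim_equal_split_section_entries_py := by
  intro lines _
  unfold Spec_split_section_entries_py
  exact pvMain lines
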